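-- pv_equiv track=rewrite | github.com/asigalov61/tegridymidi | tegridymidi/chords.py | validate_chord_pitches
-- ===== SOURCE A (Python) =====
-- def bad_chord(chord):
--     bad = any(b - a == 1 for a, b in zip(chord, chord[1:]))
--     if (0 in chord) and (11 in chord):
--       bad = True
--
--     return bad
--
-- def validate_chord_pitches(chord, channel_to_check = 0, return_sorted = True):
--
--     pitches_chord = sorted(list(set([x[4] for x in chord if 0 < x[4] < 128 and x[3] == channel_to_check])))
--
--     if pitches_chord:
--
--       tones_chord = sorted(list(set([c % 12 for c in sorted(list(set(pitches_chord)))])))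
--
--       if not bad_chord(tones_chord):
--         if return_sorted:
--           chord.sort(key = lambda x: x[4], reverse=True)
--         return chord
--
--       else:
--         if 0 in tones_chord and 11 in tones_chord:
--           tones_chord.remove(0)
--
--         fixed_tones = [[a, b] for a, b in zip(tones_chord, tones_chord[1:]) if b-a != 1]
--
--         fixed_tones_chord = []
--         for f in fixed_tones:
--           fixed_tones_chord.extend(f)
--         fixed_tones_chord = list(set(fixed_tones_chord))
--
--         fixed_chord = []
--
--         for c in chord:
--           if c[3] == channel_to_check:
--             if (c[4] % 12) in fixed_tones_chord:
--               fixed_chord.append(c)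
--           else:
--             fixed_chord.append(c)
--
--         if return_sorted:
--           fixed_chord.sort(key = lambda x: x[4], reverse=True)
--
--         return fixed_chord
--
--     else:
--       chord.sort(key = lambda x: x[4], reverse=True)
--       return chord
-- ===== SOURCE B (Python) =====
-- def validate_chord_pitches(chord, channel_to_check=0, return_sorted=True):
--     present = [False] * 12
--     for x in chord:
--         if 0 < x[4] < 128 and x[3] == channel_to_check:
--             present[x[4] % 12] = True
--     if not any(present):
--         chord.sort(key=lambda x: x[4], reverse=True)
--         return chord
--     clash = (present[0] and present[11]) or any(present[t] and present[t + 1] for t in range(11))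
--     if not clash:
--         if return_sorted:
--             chord.sort(key=lambda x: x[4], reverse=True)
--         return chord
--     if present[0] and present[11]:
--         present[0] = False
--     lo = min(t for t in range(12) if present[t])
--     hi = max(t for t in range(12) if present[t])
--     keep = [present[t] and ((t > lo and not present[t - 1]) or (t < hi and not present[t + 1]))
--             for t in range(12)]
--     fixed = [c for c in chord if c[3] != channel_to_check or keep[c[4] % 12]]
--     if return_sorted:
--         fixed.sort(key=lambda x: x[4], reverse=True)
--     return fixed
-- ===== Notes on version B (the rewrite author's own statement) =====
-- stated objective: alternative
-- what changed: B drops A's sorted-unique tone lists and pair/zip/flatten/dedup machinery entirely: it marks pitch classes in a fixed 12-slot boolean table in one pass, detects semitone clashes by table lookups present[t]&&present[t+1], and computes the keep decision per pitch class arithmetically from min/max occupied slot and the two neighbouring slots.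
-- outside the precondition, e.g. on validate_chord_pitches([[1, 2]], 0, True): A raises IndexError, B raises IndexError
import Mathlib
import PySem

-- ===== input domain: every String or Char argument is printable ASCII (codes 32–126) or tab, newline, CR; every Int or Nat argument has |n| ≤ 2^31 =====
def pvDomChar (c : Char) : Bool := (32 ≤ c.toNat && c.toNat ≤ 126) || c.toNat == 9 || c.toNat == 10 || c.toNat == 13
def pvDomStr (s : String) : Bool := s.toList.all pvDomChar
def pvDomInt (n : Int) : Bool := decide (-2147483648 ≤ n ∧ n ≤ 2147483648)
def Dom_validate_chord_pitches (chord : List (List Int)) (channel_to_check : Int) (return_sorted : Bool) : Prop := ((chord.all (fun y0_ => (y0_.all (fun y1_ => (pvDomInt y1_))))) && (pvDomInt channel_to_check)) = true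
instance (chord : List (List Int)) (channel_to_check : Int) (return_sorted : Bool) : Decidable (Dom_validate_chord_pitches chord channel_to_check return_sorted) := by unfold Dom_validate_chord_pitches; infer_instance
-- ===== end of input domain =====

-- B replaces A's sorted-unique tone lists and pair/zip/flatten/dedup machinery by a fixed 12-slot
-- boolean presence table filled in one pass, with clash detection and the keep decision read off the
-- table (objective: alternative). A sorts `chord` in place in some branches; this file proves
-- equality of RETURN values (B performs the same in-place sorts in Source B).

-- ===== PORT A =====
def bad_chord (chord : List Int) : Bool :=
  let bad := (chord.zip (chord.drop 1)).any (fun p => p.2 - p.1 == 1)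
  if chord.contains 0 && chord.contains 11 then true else bad

def validate_chord_pitches (chord : List (List Int)) (channel_to_check : Int) (return_sorted : Bool) : List (List Int) :=
  -- x[4] / x[3]: pyGetD is exact under Pre_ (every event has ≥ 5 entries)
  let pitches_chord := PySem.List.sorted (PySem.Set.ofList
    ((chord.filter (fun x => decide (0 < PySem.List.pyGetD x 4 0) && decide (PySem.List.pyGetD x 4 0 < 128) &&
        (PySem.List.pyGetD x 3 0 == channel_to_check))).map (fun x => PySem.List.pyGetD x 4 0))) (fun c => c) false
  if pitches_chord ≠ [] then
    let tones_chord := PySem.List.sorted (PySem.Set.ofList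
      ((PySem.List.sorted (PySem.Set.ofList pitches_chord) (fun c => c) false).map
        (fun c => PySem.Int.mod c 12))) (fun c => c) false
    if !(bad_chord tones_chord) then
      if return_sorted then PySem.List.sorted chord (fun x => PySem.List.pyGetD x 4 0) true else chord
    else
      let tones_chord := if tones_chord.contains 0 && tones_chord.contains 11 then
          (PySem.List.remove? tones_chord 0).getD tones_chord else tones_chord
      let fixed_tones := ((tones_chord.zip (tones_chord.drop 1)).filter
        (fun p => !(p.2 - p.1 == 1))).map (fun p => [p.1, p.2])
      let fixed_tones_chord := fixed_tones.foldl (fun acc f => acc ++ f) ([] : List Int)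
      let fixed_tones_chord := PySem.Set.ofList fixed_tones_chord
      let fixed_chord := chord.foldl (fun acc c =>
        if PySem.List.pyGetD c 3 0 == channel_to_check then
          (if fixed_tones_chord.contains (PySem.Int.mod (PySem.List.pyGetD c 4 0) 12) then acc ++ [c] else acc)
        else acc ++ [c]) ([] : List (List Int))
      if return_sorted then PySem.List.sorted fixed_chord (fun x => PySem.List.pyGetD x 4 0) true else fixed_chord
  else
    PySem.List.sorted chord (fun x => PySem.List.pyGetD x 4 0) true

-- ===== PORT B =====
-- present[x[4] % 12] = True over one pass; `any(present)`, a `range(11)` clash scan, min/max of the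
-- occupied slots; Python's index `t` (range(12)) is a Nat here and present[t-1]/present[t+1] are
-- getD lookups, guarded by t > lo / t < hi exactly as Python short-circuits them.
def validate_chord_pitches_alt (chord : List (List Int)) (channel_to_check : Int) (return_sorted : Bool) : List (List Int) :=
  let present := chord.foldl (fun pr x =>
    if decide (0 < PySem.List.pyGetD x 4 0) && decide (PySem.List.pyGetD x 4 0 < 128) &&
       (PySem.List.pyGetD x 3 0 == channel_to_check)
    then pr.set (PySem.Int.mod (PySem.List.pyGetD x 4 0) 12).toNat true else pr)
    (List.replicate 12 false)
  if !(present.any (fun b => b)) then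
    PySem.List.sorted chord (fun x => PySem.List.pyGetD x 4 0) true
  else
    let clash := (present.getD 0 false && present.getD 11 false) ||
      (List.range 11).any (fun t => present.getD t false && present.getD (t+1) false)
    if !clash then
      if return_sorted then PySem.List.sorted chord (fun x => PySem.List.pyGetD x 4 0) true else chord
    else
      let present := if present.getD 0 false && present.getD 11 false then present.set 0 false else present
      let occ := ((List.range 12).filter (fun t => present.getD t false)).map (fun t => Int.ofNat t)
      let lo := (PySem.List.min? occ (fun t => t)).getD 0
      let hi := (PySem.List.max? occ (fun t => t)).getD 0
      let keep := (List.range 12).map (fun t => present.getD t false &&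
        ((decide (lo < Int.ofNat t) && !(present.getD (t-1) false)) ||
         (decide (Int.ofNat t < hi) && !(present.getD (t+1) false))))
      let fixed := chord.filter (fun c => !(PySem.List.pyGetD c 3 0 == channel_to_check) ||
        keep.getD (PySem.Int.mod (PySem.List.pyGetD c 4 0) 12).toNat false)
      if return_sorted then PySem.List.sorted fixed (fun x => PySem.List.pyGetD x 4 0) true else fixed

-- ===== PRECONDITION & SPEC =====
-- Pre_ excludes chords containing an event list with fewer than 5 entries: there Python A raises IndexError on x[4].
def Pre_validate_chord_pitches (chord : List (List Int)) (channel_to_check : Int) (return_sorted : Bool) : Prop :=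
  ∀ x ∈ chord, 5 ≤ x.length
instance (chord : List (List Int)) (channel_to_check : Int) (return_sorted : Bool) : Decidable (Pre_validate_chord_pitches chord channel_to_check return_sorted) := by unfold Pre_validate_chord_pitches; infer_instance
def pvWitness_validate_chord_pitches : List (List Int) × Int × Bool := ([[0, 0, 0, 0, 60], [0, 0, 0, 0, 61]], 0, true)

def Spec_validate_chord_pitches (chord : List (List Int)) (channel_to_check : Int) (return_sorted : Bool) (out : List (List Int)) : Prop := out = validate_chord_pitches_alt chord channel_to_check return_sorted
instance (chord : List (List Int)) (channel_to_check : Int) (return_sorted : Bool) (out : List (List Int)) : Decidable (Spec_validate_chord_pitches chord channel_to_check return_sorted out) := by unfold Spec_validate_chord_pitches; infer_instance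

-- ===== CLAIM (what is proved, stated in full; the proofs are below) =====
def Claim_equal_validate_chord_pitches : Prop := ∀ (chord : List (List Int)) (channel_to_check : Int) (return_sorted : Bool), Dom_validate_chord_pitches chord channel_to_check return_sorted → Pre_validate_chord_pitches chord channel_to_check return_sorted → Spec_validate_chord_pitches chord channel_to_check return_sorted (validate_chord_pitches chord channel_to_check return_sorted)

-- ===== LEMMAS AND PROOFS =====

-- the sorted unique tone list, reconstructed from a 12-slot presence vector
def canonT (bs : List Bool) : List Int :=
  ((List.range 12).filter (fun t => bs.getD t false)).map (fun t => Int.ofNat t)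

-- A's whole keep machinery (remove 0, bad pairs, flatten) as a 12-slot membership table
def AkeepList (bs : List Bool) : List Bool :=
  let T := canonT bs
  let T' := if T.contains 0 && T.contains 11 then (PySem.List.remove? T 0).getD T else T
  let flat := (((T'.zip (T'.drop 1)).filter (fun p => !(p.2 - p.1 == 1))).map
    (fun p => [p.1, p.2])).foldl (fun acc f => acc ++ f) ([] : List Int)
  (List.range 12).map (fun t => flat.contains (Int.ofNat t))

-- B's keep table, as in the port
def BkeepList (bs : List Bool) : List Bool :=
  let present := if bs.getD 0 false && bs.getD 11 false then bs.set 0 false else bs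
  let occ := ((List.range 12).filter (fun t => present.getD t false)).map (fun t => Int.ofNat t)
  let lo := (PySem.List.min? occ (fun t => t)).getD 0
  let hi := (PySem.List.max? occ (fun t => t)).getD 0
  (List.range 12).map (fun t => present.getD t false &&
    ((decide (lo < Int.ofNat t) && !(present.getD (t-1) false)) ||
     (decide (Int.ofNat t < hi) && !(present.getD (t+1) false))))

def clashOf (bs : List Bool) : Bool :=
  (bs.getD 0 false && bs.getD 11 false) ||
    (List.range 11).any (fun t => bs.getD t false && bs.getD (t+1) false)

-- two strictly increasing Int lists with the same members are equal
theorem pairwise_lt_ext (l1 l2 : List Int) (p1 : l1.Pairwise (· < ·)) (p2 : l2.Pairwise (· < ·))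
    (h : ∀ v, v ∈ l1 ↔ v ∈ l2) : l1 = l2 := by
  have perm := (List.perm_ext_iff_of_nodup (p1.imp ne_of_lt) (p2.imp ne_of_lt)).mpr h
  exact perm.eq_of_pairwise (fun a b _ _ h1 h2 => le_antisymm h1 h2) (p1.imp le_of_lt) (p2.imp le_of_lt)

theorem canon_pairwise (bs : List Bool) : (canonT bs).Pairwise (· < ·) := by
  unfold canonT
  refine List.Pairwise.map _ (fun a b h => ?_) ((List.pairwise_lt_range).filter _)
  exact Int.ofNat_lt.mpr h

theorem mem_canon (bs : List Bool) (v : Int) :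
    v ∈ canonT bs ↔ ∃ t : Nat, t < 12 ∧ bs.getD t false = true ∧ v = Int.ofNat t := by
  unfold canonT
  simp only [List.mem_map, List.mem_filter, List.mem_range]
  constructor
  · rintro ⟨t, ⟨ht, hb⟩, rfl⟩; exact ⟨t, ht, hb, rfl⟩
  · rintro ⟨t, ht, hb, rfl⟩; exact ⟨t, ⟨ht, hb⟩, rfl⟩

theorem mod12_bounds (v : Int) : 0 ≤ PySem.Int.mod v 12 ∧ PySem.Int.mod v 12 < 12 := by
  rw [PySem.Int.mod_eq_emod_of_pos (by norm_num : (0:Int) < 12)]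
  exact ⟨Int.emod_nonneg v (by norm_num), Int.emod_lt_of_pos v (by norm_num)⟩

theorem ofList_eq_nil_iff (l : List Int) : PySem.Set.ofList l = [] ↔ l = [] := by
  rw [List.eq_nil_iff_forall_not_mem, List.eq_nil_iff_forall_not_mem]
  simp [PySem.Set.mem_ofList]

-- A's sorted-set-of-mods-of-sorted-set-of-pitches equals the sorted set of mods
theorem tones_eq_aux (M : List (List Int)) :
    PySem.List.sorted (PySem.Set.ofList
      ((PySem.List.sorted (PySem.Set.ofList
          (PySem.List.sorted (PySem.Set.ofList (M.map (fun x => PySem.List.pyGetD x 4 0))) (fun c => c) false))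
          (fun c => c) false).map (fun c => PySem.Int.mod c 12))) (fun c => c) false
      = PySem.List.sorted (PySem.Set.ofList
          (M.map (fun x => PySem.Int.mod (PySem.List.pyGetD x 4 0) 12))) (fun c => c) false := by
  apply pairwise_lt_ext _ _ (PySem.List.sorted_ofList_pairwise_lt _) (PySem.List.sorted_ofList_pairwise_lt _)
  intro v
  simp only [List.mem_map, PySem.List.mem_sorted, PySem.Set.mem_ofList]
  constructor
  · rintro ⟨c, ⟨x, hx, rfl⟩, rfl⟩; exact ⟨x, hx, rfl⟩
  · rintro ⟨x, hx, rfl⟩; exact ⟨PySem.List.pyGetD x 4 0, ⟨x, hx, rfl⟩, rfl⟩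

theorem nil_iff_aux (M : List (List Int)) :
    (PySem.List.sorted (PySem.Set.ofList (M.map (fun x => PySem.List.pyGetD x 4 0))) (fun c => c) false = [])
      ↔ (PySem.List.sorted (PySem.Set.ofList
          (M.map (fun x => PySem.Int.mod (PySem.List.pyGetD x 4 0) 12))) (fun c => c) false = []) := by
  simp [PySem.List.sorted_eq_nil_iff, ofList_eq_nil_iff]

-- a duplicate-free ascending list of Ints in [0,12) is the canonical list of its presence vector
theorem sorted_eq_canon (l : List Int) (hl : ∀ v ∈ l, 0 ≤ v ∧ v < 12) :
    PySem.List.sorted (PySem.Set.ofList l) (fun c => c) false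
      = canonT ((List.range 12).map (fun t => decide ((Int.ofNat t) ∈ l))) := by
  apply pairwise_lt_ext _ _ (PySem.List.sorted_ofList_pairwise_lt _) (canon_pairwise _)
  intro v
  rw [mem_canon, PySem.List.mem_sorted, PySem.Set.mem_ofList]
  constructor
  · intro hv
    obtain ⟨h0, h12⟩ := hl v hv
    refine ⟨v.toNat, by omega, ?_, by rw [Int.ofNat_eq_natCast]; omega⟩
    simp only [List.getD_eq_getElem?_getD, List.getElem?_map]
    rw [List.getElem?_range (by omega)]
    simp only [Option.map_some, Option.getD_some, decide_eq_true_eq]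
    rwa [show Int.ofNat v.toNat = v by rw [Int.ofNat_eq_natCast]; omega]
  · rintro ⟨t, ht, hb, rfl⟩
    simp only [List.getD_eq_getElem?_getD, List.getElem?_map] at hb
    rw [List.getElem?_range ht] at hb
    simpa using hb

-- the fold over chord preserves the table length
theorem fold_len (ch : Int) : ∀ (cs : List (List Int)) (pr0 : List Bool),
    (cs.foldl (fun pr x =>
      if decide (0 < PySem.List.pyGetD x 4 0) && decide (PySem.List.pyGetD x 4 0 < 128) &&
         (PySem.List.pyGetD x 3 0 == ch)
      then pr.set (PySem.Int.mod (PySem.List.pyGetD x 4 0) 12).toNat true else pr) pr0).length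
      = pr0.length := by
  intro cs
  induction cs with
  | nil => intro pr0; rfl
  | cons c cs ih =>
    intro pr0
    rw [List.foldl_cons, ih]
    split <;> simp

-- the presence table computed by B's single pass, slot by slot
theorem fold_getD (ch : Int) (cs : List (List Int)) :
    ∀ (pr0 : List Bool), pr0.length = 12 → ∀ t : Nat, t < 12 →
    (cs.foldl (fun pr x =>
        if decide (0 < PySem.List.pyGetD x 4 0) && decide (PySem.List.pyGetD x 4 0 < 128) &&
           (PySem.List.pyGetD x 3 0 == ch)
        then pr.set (PySem.Int.mod (PySem.List.pyGetD x 4 0) 12).toNat true else pr) pr0).getD t false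
      = (pr0.getD t false ||
          decide ((Int.ofNat t) ∈ (cs.filter (fun x => decide (0 < PySem.List.pyGetD x 4 0) &&
              decide (PySem.List.pyGetD x 4 0 < 128) && (PySem.List.pyGetD x 3 0 == ch))).map
            (fun x => PySem.Int.mod (PySem.List.pyGetD x 4 0) 12))) := by
  induction cs with
  | nil => intro pr0 _ t _; simp
  | cons c cs ih =>
    intro pr0 hlen t ht
    rw [List.foldl_cons]
    by_cases hc : (decide (0 < PySem.List.pyGetD c 4 0) && decide (PySem.List.pyGetD c 4 0 < 128) &&
        (PySem.List.pyGetD c 3 0 == ch)) = true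
    · have hm := mod12_bounds (PySem.List.pyGetD c 4 0)
      rw [if_pos hc, ih _ (by rw [List.length_set]; exact hlen) t ht]
      have hset : (pr0.set (PySem.Int.mod (PySem.List.pyGetD c 4 0) 12).toNat true).getD t false
          = if t = (PySem.Int.mod (PySem.List.pyGetD c 4 0) 12).toNat then true else pr0.getD t false := by
        simp only [List.getD_eq_getElem?_getD, List.getElem?_set]
        have hmn : (PySem.Int.mod (PySem.List.pyGetD c 4 0) 12).toNat < pr0.length := by
          rw [hlen]; omega
        by_cases h1 : (PySem.Int.mod (PySem.List.pyGetD c 4 0) 12).toNat = t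
        · rw [if_pos h1, if_pos hmn, if_pos h1.symm]; rfl
        · rw [if_neg h1, if_neg (fun hh => h1 hh.symm)]
      rw [hset]
      simp only [List.filter_cons, hc, if_true, List.map_cons, List.mem_cons]
      have hiff : ((Int.ofNat t) = PySem.Int.mod (PySem.List.pyGetD c 4 0) 12)
          ↔ (t = (PySem.Int.mod (PySem.List.pyGetD c 4 0) 12).toNat) := by
        rw [Int.ofNat_eq_natCast]; omega
      by_cases he : t = (PySem.Int.mod (PySem.List.pyGetD c 4 0) 12).toNat
      · rw [if_pos he]
        rw [Bool.true_or, eq_comm, Bool.or_eq_true]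
        right
        rw [decide_eq_true_eq]
        exact Or.inl (hiff.mpr he)
      · rw [if_neg he]
        congr 1
        simp only [decide_eq_decide]
        constructor
        · intro h; exact Or.inr h
        · rintro (h | h)
          · exact absurd (hiff.mp h) he
          · exact h
    · have hc' : (decide (0 < PySem.List.pyGetD c 4 0) && decide (PySem.List.pyGetD c 4 0 < 128) &&
          (PySem.List.pyGetD c 3 0 == ch)) = false := by simpa using hc
      rw [if_neg hc, ih _ hlen t ht, List.filter_cons_of_neg (by simp [hc'])]

-- index into a 12-slot table built by mapping over range 12
theorem getD_map_range12 (f : Nat → Bool) (t : Nat) (ht : t < 12) :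
    ((List.range 12).map f).getD t false = f t := by
  simp only [List.getD_eq_getElem?_getD, List.getElem?_map]
  rw [List.getElem?_range ht]
  rfl

-- every length-12 list of booleans is a 12-tuple
theorem len12_cases (bs : List Bool) (h : bs.length = 12) :
    ∃ b0 b1 b2 b3 b4 b5 b6 b7 b8 b9 b10 b11 : Bool,
      bs = [b0, b1, b2, b3, b4, b5, b6, b7, b8, b9, b10, b11] := by
  rcases bs with _ | ⟨b0, bs⟩; · simp at h
  rcases bs with _ | ⟨b1, bs⟩; · simp at h
  rcases bs with _ | ⟨b2, bs⟩; · simp at h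
  rcases bs with _ | ⟨b3, bs⟩; · simp at h
  rcases bs with _ | ⟨b4, bs⟩; · simp at h
  rcases bs with _ | ⟨b5, bs⟩; · simp at h
  rcases bs with _ | ⟨b6, bs⟩; · simp at h
  rcases bs with _ | ⟨b7, bs⟩; · simp at h
  rcases bs with _ | ⟨b8, bs⟩; · simp at h
  rcases bs with _ | ⟨b9, bs⟩; · simp at h
  rcases bs with _ | ⟨b10, bs⟩; · simp at h
  rcases bs with _ | ⟨b11, bs⟩; · simp at h
  rcases bs with _ | ⟨b12, bs⟩
  · exact ⟨b0, b1, b2, b3, b4, b5, b6, b7, b8, b9, b10, b11, rfl⟩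
  · simp at h

-- the finite core: over all 4096 presence vectors, A's tone machinery and B's table agree
set_option maxHeartbeats 4000000 in
theorem master : ∀ (b0 b1 b2 b3 b4 b5 b6 b7 b8 b9 b10 b11 : Bool),
    ((canonT [b0, b1, b2, b3, b4, b5, b6, b7, b8, b9, b10, b11] = [])
        ↔ ([b0, b1, b2, b3, b4, b5, b6, b7, b8, b9, b10, b11].any (fun b => b) = false))
    ∧ bad_chord (canonT [b0, b1, b2, b3, b4, b5, b6, b7, b8, b9, b10, b11])
        = clashOf [b0, b1, b2, b3, b4, b5, b6, b7, b8, b9, b10, b11]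
    ∧ AkeepList [b0, b1, b2, b3, b4, b5, b6, b7, b8, b9, b10, b11]
        = BkeepList [b0, b1, b2, b3, b4, b5, b6, b7, b8, b9, b10, b11] := by
  decide

-- A's append loop over chord equals B's filter, given matching keep predicates
theorem fixed_eq_aux (chord : List (List Int)) (ch : Int) (flat : List Int) (keep : List Bool)
    (hk : ∀ v : Int, 0 ≤ v → v < 12 →
      (PySem.Set.ofList flat).contains v = keep.getD v.toNat false) :
    chord.foldl (fun acc c =>
        if PySem.List.pyGetD c 3 0 == ch then
          (if (PySem.Set.ofList flat).contains (PySem.Int.mod (PySem.List.pyGetD c 4 0) 12)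
            then acc ++ [c] else acc)
        else acc ++ [c]) ([] : List (List Int))
      = chord.filter (fun c => !(PySem.List.pyGetD c 3 0 == ch) ||
          keep.getD (PySem.Int.mod (PySem.List.pyGetD c 4 0) 12).toNat false) := by
  have hbody : (fun (acc : List (List Int)) (c : List Int) =>
        if PySem.List.pyGetD c 3 0 == ch then
          (if (PySem.Set.ofList flat).contains (PySem.Int.mod (PySem.List.pyGetD c 4 0) 12)
            then acc ++ [c] else acc)
        else acc ++ [c])
      = (fun (acc : List (List Int)) (c : List Int) =>
          if (!(PySem.List.pyGetD c 3 0 == ch) ||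
              keep.getD (PySem.Int.mod (PySem.List.pyGetD c 4 0) 12).toNat false) then
            acc ++ [c] else acc) := by
    funext acc c
    have hm := mod12_bounds (PySem.List.pyGetD c 4 0)
    rw [show (PySem.Set.ofList flat).contains (PySem.Int.mod (PySem.List.pyGetD c 4 0) 12)
        = keep.getD (PySem.Int.mod (PySem.List.pyGetD c 4 0) 12).toNat false from hk _ hm.1 hm.2]
    cases h3 : (PySem.List.pyGetD c 3 0 == ch) <;>
      cases h4 : keep.getD (PySem.Int.mod (PySem.List.pyGetD c 4 0) 12).toNat false <;>
      simp
  rw [hbody, PySem.List.foldl_append_if_eq_filter]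
  exact List.nil_append _

-- ===== VERDICT (by name: the statement is the Claim_ definition above) =====
theorem validate_chord_pitches_spec : Claim_equal_validate_chord_pitches := by
  intro chord ch rs _ _
  show validate_chord_pitches chord ch rs = validate_chord_pitches_alt chord ch rs
  unfold validate_chord_pitches validate_chord_pitches_alt
  dsimp only
  rw [tones_eq_aux]
  set M := chord.filter (fun x => decide (0 < PySem.List.pyGetD x 4 0) &&
    decide (PySem.List.pyGetD x 4 0 < 128) && (PySem.List.pyGetD x 3 0 == ch)) with hM
  set L := M.map (fun x => PySem.Int.mod (PySem.List.pyGetD x 4 0) 12) with hL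
  set P := chord.foldl (fun pr x =>
    if decide (0 < PySem.List.pyGetD x 4 0) && decide (PySem.List.pyGetD x 4 0 < 128) &&
       (PySem.List.pyGetD x 3 0 == ch)
    then pr.set (PySem.Int.mod (PySem.List.pyGetD x 4 0) 12).toNat true else pr)
    (List.replicate 12 false) with hP
  have hPlen : P.length = 12 := by
    rw [hP, fold_len ch chord (List.replicate 12 false)]
    rfl
  have hPget : ∀ t : Nat, t < 12 → P.getD t false = decide ((Int.ofNat t) ∈ L) := by
    intro t ht
    rw [hP, fold_getD ch chord (List.replicate 12 false) (by simp) t ht]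
    rw [← hM, ← hL]
    have hrep : (List.replicate 12 false).getD t false = false := by
      rw [List.getD_eq_getElem?_getD]
      cases h : (List.replicate 12 false)[t]? with
      | none => rfl
      | some b =>
        rw [List.eq_of_mem_replicate (List.mem_of_getElem? h)]
        rfl
    rw [hrep, Bool.false_or]
  have hLb : ∀ v ∈ L, 0 ≤ v ∧ v < 12 := by
    rw [hL]; rintro v hv
    simp only [List.mem_map] at hv
    obtain ⟨x, _, rfl⟩ := hv
    exact mod12_bounds _
  have hT : PySem.List.sorted (PySem.Set.ofList L) (fun c => c) false = canonT P := by
    rw [sorted_eq_canon L hLb]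
    unfold canonT
    congr 1
    apply List.filter_congr
    intro t htm
    rw [List.mem_range] at htm
    rw [getD_map_range12 _ t htm, hPget t htm]
  obtain ⟨b0, b1, b2, b3, b4, b5, b6, b7, b8, b9, b10, b11, hPeq⟩ := len12_cases P hPlen
  obtain ⟨hnil, hbad, hkeep⟩ := master b0 b1 b2 b3 b4 b5 b6 b7 b8 b9 b10 b11
  rw [← hPeq] at hnil hbad hkeep
  by_cases hE : PySem.List.sorted (PySem.Set.ofList (M.map (fun x => PySem.List.pyGetD x 4 0)))
      (fun c => c) false = []
  · -- no pitches on the channel: both return chord sorted descending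
    have hPany : (P.any (fun b => b)) = false := by
      rw [← hnil, ← hT]; exact (nil_iff_aux M).mp hE
    rw [if_neg (not_not_intro hE), if_pos (by rw [hPany]; rfl)]
  · have hPany : ¬((!(P.any (fun b => b))) = true) := by
      intro hcon
      apply hE
      apply (nil_iff_aux M).mpr
      rw [hT, hnil]
      simpa using hcon
    rw [if_pos hE, if_neg hPany, hT, hbad]
    have hclB : ((P.getD 0 false && P.getD 11 false) ||
        (List.range 11).any (fun t => P.getD t false && P.getD (t+1) false)) = clashOf P := rfl
    rw [hclB]
    cases hcl : clashOf P with
    | false => rfl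
    | true =>
      -- clash branch: A's flatten set equals B's keep table
      have hfix := fixed_eq_aux chord ch
        ((((( if (canonT P).contains 0 && (canonT P).contains 11 then
                (PySem.List.remove? (canonT P) 0).getD (canonT P) else canonT P).zip
            ((if (canonT P).contains 0 && (canonT P).contains 11 then
                (PySem.List.remove? (canonT P) 0).getD (canonT P) else canonT P).drop 1)).filter
            (fun p => !(p.2 - p.1 == 1))).map (fun p => [p.1, p.2])).foldl
          (fun acc f => acc ++ f) ([] : List Int))
        (BkeepList P)
        (by
          intro v h0 h12
          have hvt : v.toNat < 12 := by omega
          rw [← hkeep]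
          have hA : AkeepList P = (List.range 12).map (fun t =>
              ((((( if (canonT P).contains 0 && (canonT P).contains 11 then
                      (PySem.List.remove? (canonT P) 0).getD (canonT P) else canonT P).zip
                  ((if (canonT P).contains 0 && (canonT P).contains 11 then
                      (PySem.List.remove? (canonT P) 0).getD (canonT P) else canonT P).drop 1)).filter
                  (fun p => !(p.2 - p.1 == 1))).map (fun p => [p.1, p.2])).foldl
                (fun acc f => acc ++ f) ([] : List Int)).contains (Int.ofNat t)) := rfl
          rw [hA, getD_map_range12 _ _ hvt, show Int.ofNat v.toNat = v by rw [Int.ofNat_eq_natCast]; omega]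
          rw [Bool.eq_iff_iff, PySem.Set.contains_iff, PySem.Set.mem_ofList, List.contains_iff_mem])
      rw [hfix]
      have hB : BkeepList P = (List.range 12).map (fun t =>
          (if P.getD 0 false && P.getD 11 false then P.set 0 false else P).getD t false &&
          ((decide ((PySem.List.min? (((List.range 12).filter (fun t =>
                (if P.getD 0 false && P.getD 11 false then P.set 0 false else P).getD t false)).map
                (fun t => Int.ofNat t)) (fun t => t)).getD 0 < Int.ofNat t) &&
              !((if P.getD 0 false && P.getD 11 false then P.set 0 false else P).getD (t-1) false)) ||
           (decide (Int.ofNat t < (PySem.List.max? (((List.range 12).filter (fun t =>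
                (if P.getD 0 false && P.getD 11 false then P.set 0 false else P).getD t false)).map
                (fun t => Int.ofNat t)) (fun t => t)).getD 0) &&
              !((if P.getD 0 false && P.getD 11 false then P.set 0 false else P).getD (t+1) false)))) := rfl
      rw [← hB]
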